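-- pv_equiv track=rewrite | github.com/freducom/bloomvalley | analyst-swarm/swarm.py | _build_short_prompt
-- ===== SOURCE A (Python) =====
-- def _build_short_prompt(agent_name: str, full_def: str) -> str:
--     """Extract essential sections from a full agent definition for smaller models.
--
--     Keeps: role paragraph, data access list, output format section.
--     Strips: lengthy methodology explanations, detailed frameworks.
--     """
--     lines = full_def.split("\n")
--     result = []
--     in_output_section = False
--     in_role_section = True
--     role_lines = 0
--
--     for line in lines:
--         # Always keep headings
--         if line.startswith("#"):
--             header_lower = line.lower()
--             if any(k in header_lower for k in ["output", "format", "report structure",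
--                                                   "deliverable", "response format"]):
--                 in_output_section = True
--                 in_role_section = False
--                 result.append(line)
--                 continue
--             elif any(k in header_lower for k in ["data", "api", "endpoint", "access"]):
--                 in_output_section = False
--                 in_role_section = False
--                 result.append(line)
--                 continue
--             elif any(k in header_lower for k in ["framework", "methodology", "process",
--                                                     "workflow", "detailed", "guidelines"]):
--                 in_output_section = False
--                 in_role_section = False
--                 continue  # Skip these sections entirely
--             else:
--                 in_output_section = False
--                 in_role_section = False
--                 continue  # Skip unknown sections
--
--         # Keep the role description (first ~15 lines before first heading)
--         if in_role_section:
--             role_lines += 1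
--             if role_lines <= 20:
--                 result.append(line)
--             continue
--
--         # Keep output format section
--         if in_output_section:
--             result.append(line)
--
--     return "\n".join(result)
-- ===== SOURCE B (Python) =====
-- OUTPUT_KEYS = ["output", "format", "report structure", "deliverable", "response format"]
-- DATA_KEYS = ["data", "api", "endpoint", "access"]
--
--
-- def _build_short_prompt(agent_name: str, full_def: str) -> str:
--     """Two-pass version: split into role preamble + (heading, body) sections, then emit."""
--     lines = full_def.split("\n")
--     # pass 1: structure
--     i = 0
--     preamble = []
--     while i < len(lines) and not lines[i].startswith("#"):
--         preamble.append(lines[i])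
--         i += 1
--     sections = []
--     while i < len(lines):
--         heading = lines[i]
--         i += 1
--         body = []
--         while i < len(lines) and not lines[i].startswith("#"):
--             body.append(lines[i])
--             i += 1
--         sections.append((heading, body))
--     # pass 2: emit
--     out = preamble[:20]
--     for heading, body in sections:
--         h = heading.lower()
--         if any(k in h for k in OUTPUT_KEYS):
--             out.append(heading)
--             out.extend(body)
--         elif any(k in h for k in DATA_KEYS):
--             out.append(heading)
--     return "\n".join(out)
-- ===== Notes on version B (the rewrite author's own statement) =====
-- stated objective: simpler
-- what changed: Replaced A's single scan threading four pieces of mutable state (in_output_section/in_role_section/role_lines flags) with two passes: first partition the lines into a role preamble plus (heading, body) sections, then classify each section once and emit preamble[:20], heading+body for output sections and heading only for data sections.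
import Mathlib
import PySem

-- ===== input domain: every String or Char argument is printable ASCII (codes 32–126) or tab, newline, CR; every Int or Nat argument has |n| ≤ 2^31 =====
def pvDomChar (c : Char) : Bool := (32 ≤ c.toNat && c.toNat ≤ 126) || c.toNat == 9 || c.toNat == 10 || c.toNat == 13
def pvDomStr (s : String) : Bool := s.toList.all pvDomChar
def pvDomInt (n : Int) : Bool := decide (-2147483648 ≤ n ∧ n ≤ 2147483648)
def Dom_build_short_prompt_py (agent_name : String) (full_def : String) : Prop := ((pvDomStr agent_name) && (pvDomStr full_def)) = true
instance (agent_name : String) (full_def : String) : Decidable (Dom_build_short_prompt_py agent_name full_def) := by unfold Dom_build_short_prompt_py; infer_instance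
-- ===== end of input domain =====

-- B restructures A's single stateful scan into two passes (partition into role preamble
-- + heading/body sections, then classify and emit); objective: simpler, same cost.

-- shared keyword tables and tests (identical literal lists in both Pythons)
def pvKwOut : List String := ["output", "format", "report structure", "deliverable", "response format"]
def pvKwData : List String := ["data", "api", "endpoint", "access"]
def pvKwSkip : List String := ["framework", "methodology", "process", "workflow", "detailed", "guidelines"]
def pvHasKw (h : String) (ks : List String) : Bool := ks.any (fun k => PySem.Str.isIn k h)

-- ===== PORT A =====
-- loop state: (result, in_output_section, in_role_section, role_lines)
def pyAStep (st : List String × Bool × Bool × Int) (line : String) : List String × Bool × Bool × Int :=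
  match st with
  | (res, io, ir, rl) =>
    if PySem.Str.startswith line "#" then
      let hl := PySem.Str.lower line
      if pvHasKw hl pvKwOut then (res ++ [line], true, false, rl)
      else if pvHasKw hl pvKwData then (res ++ [line], false, false, rl)
      else if pvHasKw hl pvKwSkip then (res, false, false, rl)   -- skip these sections entirely
      else (res, false, false, rl)                               -- skip unknown sections
    else if ir then
      let rl' := rl + 1
      if rl' ≤ 20 then (res ++ [line], io, ir, rl') else (res, io, ir, rl')
    else if io then (res ++ [line], io, ir, rl)
    else (res, io, ir, rl)

def build_short_prompt_py (agent_name : String) (full_def : String) : String :=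
  -- full_def.split("\n"): sep is nonempty so split? is always `some`
  let lines := (PySem.Str.split? full_def "\n").getD []
  PySem.Str.join "\n" (lines.foldl pyAStep ([], false, true, 0)).1

-- ===== PORT B =====
def pvIsHead (l : String) : Bool := PySem.Str.startswith l "#"

-- pass 1 (sections): each heading with the non-heading lines following it
def pvParseSections : List String → List (String × List String)
  | [] => []
  | h :: t =>
      (h, t.takeWhile (fun l => !pvIsHead l)) :: pvParseSections (t.dropWhile (fun l => !pvIsHead l))
  termination_by ls => ls.length
  decreasing_by
    simpa using Nat.lt_succ_of_le (List.length_dropWhile_le _ t)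

-- pass 2: classify each section and append what it contributes
def pvEmitStep (out : List String) (sec : String × List String) : List String :=
  let h := PySem.Str.lower sec.1
  if pvHasKw h pvKwOut then out ++ sec.1 :: sec.2
  else if pvHasKw h pvKwData then out ++ [sec.1]
  else out

def build_short_prompt_py_alt (agent_name : String) (full_def : String) : String :=
  let lines := (PySem.Str.split? full_def "\n").getD []
  let pre := lines.takeWhile (fun l => !pvIsHead l)
  let secs := pvParseSections (lines.dropWhile (fun l => !pvIsHead l))
  PySem.Str.join "\n" (secs.foldl pvEmitStep (pre.take 20))

-- ===== PRECONDITION & SPEC =====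
def Spec_build_short_prompt_py (agent_name : String) (full_def : String) (out : String) : Prop := out = build_short_prompt_py_alt agent_name full_def
instance (agent_name : String) (full_def : String) (out : String) : Decidable (Spec_build_short_prompt_py agent_name full_def out) := by unfold Spec_build_short_prompt_py; infer_instance

-- ===== CLAIM (what is proved, stated in full; the proofs are below) =====
def Claim_equal_build_short_prompt_py : Prop := ∀ (agent_name : String) (full_def : String), Dom_build_short_prompt_py agent_name full_def → Spec_build_short_prompt_py agent_name full_def (build_short_prompt_py agent_name full_def)

-- ===== LEMMAS AND PROOFS =====

lemma pvIsHead_eq (l : String) : pvIsHead l = PySem.Chars.startswith l.toList ['#'] := by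
  simp [pvIsHead]

-- what A's loop emits once in_role_section is False, as a recursion over the lines
def pvEmitRest (io : Bool) : List String → List String
  | [] => []
  | l :: t =>
    if pvIsHead l then
      if pvHasKw (PySem.Str.lower l) pvKwOut then l :: pvEmitRest true t
      else if pvHasKw (PySem.Str.lower l) pvKwData then l :: pvEmitRest false t
      else pvEmitRest false t
    else (if io then [l] else []) ++ pvEmitRest io t

lemma pyA_fold_rest (ls : List String) (acc : List String) (io : Bool) (rl : Int) :
    (ls.foldl pyAStep (acc, io, false, rl)).1 = acc ++ pvEmitRest io ls := by
  induction ls generalizing acc io rl with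
  | nil => simp [pvEmitRest]
  | cons l t ih =>
    simp only [List.foldl_cons, pyAStep, pvEmitRest]
    by_cases h1 : PySem.Chars.startswith l.toList ['#'] = true
    · by_cases ho : pvHasKw (PySem.Str.lower l) pvKwOut
      · simp [pvIsHead_eq, h1, ho, ih]
      · by_cases hd : pvHasKw (PySem.Str.lower l) pvKwData
        · simp [pvIsHead_eq, h1, ho, hd, ih]
        · by_cases hs : pvHasKw (PySem.Str.lower l) pvKwSkip <;>
            simp [pvIsHead_eq, h1, ho, hd, hs, ih]
    · cases io <;> simp [pvIsHead_eq, h1, ih]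

lemma pyA_fold_role (ls : List String) (acc : List String) (io : Bool) (rl : Int) :
    (ls.foldl pyAStep (acc, io, true, rl)).1 =
      acc ++ (ls.takeWhile (fun l => !pvIsHead l)).take (20 - rl).toNat
          ++ pvEmitRest io (ls.dropWhile (fun l => !pvIsHead l)) := by
  induction ls generalizing acc rl with
  | nil => simp [pvEmitRest]
  | cons l t ih =>
    by_cases h1 : PySem.Chars.startswith l.toList ['#'] = true
    · have ht : List.takeWhile (fun l => !pvIsHead l) (l :: t) = [] := by
        simp [pvIsHead_eq, h1]
      have hd2 : List.dropWhile (fun l => !pvIsHead l) (l :: t) = l :: t := by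
        simp [pvIsHead_eq, h1]
      rw [ht, hd2]
      simp only [List.foldl_cons, pyAStep, List.take_nil]
      by_cases ho : pvHasKw (PySem.Str.lower l) pvKwOut
      · simp [pvIsHead_eq, h1, ho, pyA_fold_rest, pvEmitRest]
      · by_cases hd : pvHasKw (PySem.Str.lower l) pvKwData
        · simp [pvIsHead_eq, h1, ho, hd, pyA_fold_rest, pvEmitRest]
        · by_cases hs : pvHasKw (PySem.Str.lower l) pvKwSkip <;>
            simp [pvIsHead_eq, h1, ho, hd, hs, pyA_fold_rest, pvEmitRest]
    · have ht : List.takeWhile (fun l => !pvIsHead l) (l :: t) =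
          l :: List.takeWhile (fun l => !pvIsHead l) t := by
        simp [pvIsHead_eq, h1]
      have hd2 : List.dropWhile (fun l => !pvIsHead l) (l :: t) =
          List.dropWhile (fun l => !pvIsHead l) t := by
        simp [pvIsHead_eq, h1]
      rw [ht, hd2]
      simp only [List.foldl_cons, pyAStep]
      by_cases h20 : rl < 20
      · have htn : (20 - rl).toNat = (20 - (rl + 1)).toNat + 1 := by omega
        simp [h1, h20, ih, htn]
      · have htn : (20 - rl).toNat = 0 := by omega
        have htn' : (20 - (rl + 1)).toNat = 0 := by omega
        simp [h1, h20, ih, htn, htn']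

-- B's emit loop, as append of per-section contributions
def pvEmitSec (sec : String × List String) : List String :=
  if pvHasKw (PySem.Str.lower sec.1) pvKwOut then sec.1 :: sec.2
  else if pvHasKw (PySem.Str.lower sec.1) pvKwData then [sec.1]
  else []

lemma pvEmit_fold (secs : List (String × List String)) (acc : List String) :
    secs.foldl pvEmitStep acc = acc ++ secs.flatMap pvEmitSec := by
  induction secs generalizing acc with
  | nil => simp
  | cons s t ih =>
    simp only [List.foldl_cons, List.flatMap_cons, pvEmitStep, pvEmitSec]
    by_cases ho : pvHasKw (PySem.Str.lower s.1) pvKwOut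
    · simp [ho, ih]
    · by_cases hd : pvHasKw (PySem.Str.lower s.1) pvKwData <;> simp [ho, hd, ih]

lemma pvEmitRest_eq (ls : List String) (io : Bool) :
    pvEmitRest io ls =
      (if io then ls.takeWhile (fun l => !pvIsHead l) else [])
        ++ (pvParseSections (ls.dropWhile (fun l => !pvIsHead l))).flatMap pvEmitSec := by
  induction ls generalizing io with
  | nil => cases io <;> simp [pvEmitRest, pvParseSections]
  | cons l t ih =>
    by_cases h1 : PySem.Chars.startswith l.toList ['#'] = true
    · have ht : List.takeWhile (fun l => !pvIsHead l) (l :: t) = [] := by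
        simp [pvIsHead_eq, h1]
      have hd2 : List.dropWhile (fun l => !pvIsHead l) (l :: t) = l :: t := by
        simp [pvIsHead_eq, h1]
      rw [ht, hd2]
      simp only [pvEmitRest, pvParseSections, List.flatMap_cons, pvEmitSec]
      by_cases ho : pvHasKw (PySem.Str.lower l) pvKwOut
      · simp [pvIsHead_eq, h1, ho, ih true]
      · by_cases hd : pvHasKw (PySem.Str.lower l) pvKwData
        · simp [pvIsHead_eq, h1, ho, hd, ih false]
        · simp [pvIsHead_eq, h1, ho, hd, ih false]
    · have ht : List.takeWhile (fun l => !pvIsHead l) (l :: t) =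
          l :: List.takeWhile (fun l => !pvIsHead l) t := by
        simp [pvIsHead_eq, h1]
      have hd2 : List.dropWhile (fun l => !pvIsHead l) (l :: t) =
          List.dropWhile (fun l => !pvIsHead l) t := by
        simp [pvIsHead_eq, h1]
      rw [ht, hd2]
      simp only [pvEmitRest]
      cases io <;> simp [pvIsHead_eq, h1, ih]

lemma pvDropWhile_fixpoint {α : Type} (p : α → Bool) (ls : List α) :
    (ls.dropWhile p).dropWhile p = ls.dropWhile p := by
  induction ls with
  | nil => simp
  | cons l t ih =>
    by_cases h : p l
    · simpa [h] using ih
    · simp [h]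

-- ===== VERDICT (by name: the statement is the Claim_ definition above) =====
theorem build_short_prompt_py_spec : Claim_equal_build_short_prompt_py := by
  intro agent_name full_def _
  show PySem.Str.join "\n"
      ((((PySem.Str.split? full_def "\n").getD []).foldl pyAStep ([], false, true, 0)).1) =
    PySem.Str.join "\n"
      ((pvParseSections (((PySem.Str.split? full_def "\n").getD []).dropWhile
          (fun l => !pvIsHead l))).foldl pvEmitStep
        ((((PySem.Str.split? full_def "\n").getD []).takeWhile (fun l => !pvIsHead l)).take 20))
  rw [pyA_fold_role, pvEmit_fold, pvEmitRest_eq,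
    pvDropWhile_fixpoint (fun l => !pvIsHead l) ((PySem.Str.split? full_def "\n").getD [])]
  rfl
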